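-- pv_equiv track=rewrite | github.com/woorog/Baekjoon | 백준/Gold/12851. 숨바꼭질 2/숨바꼭질 2.py | find_fastest_path
-- ===== SOURCE A (Python) =====
-- from collections import deque
--
-- def find_fastest_path(N, K):
--     if N >= K:
--         return N - K, 1  # 수빈이가 동생보다 앞에 있거나 같은 위치에 있을 때
--
--     visited = [0] * 100001  # 방문 여부와 해당 위치에 도달하는 최소 시간 기록
--     ways = [0] * 100001  # 각 위치에 도달하는 방법의 수
--     q = deque()
--     q.append(N)
--     visited[N] = 1  # 시작 위치 방문 처리
--     ways[N] = 1  # 시작 위치 도달 방법은 1가지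
--
--     while q:
--         x = q.popleft()
--
--         for nx in [x - 1, x + 1, x * 2]:
--             if 0 <= nx <= 100000:
--                 if visited[nx] == 0:  # 처음 방문하는 경우
--                     visited[nx] = visited[x] + 1
--                     ways[nx] = ways[x]
--                     q.append(nx)
--                 elif visited[nx] == visited[x] + 1:  # 이미 방문했지만, 최소 시간으로 도달하는 경우
--                     ways[nx] += ways[x]
--
--     return visited[K] - 1, ways[K]  # 시작 위치의 시간이 1로 계산되었으므로 -1
-- ===== SOURCE B (Python) =====
-- def find_fastest_path(N, K):
--     if N >= K:
--         return N - K, 1  # Subin is at or ahead of the sibling: walk back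
--
--     # Phase 1: plain level-by-level BFS computing only distances; keep the
--     # list of levels.  Stops as soon as K has a distance.
--     dist = [-1] * 100001
--     dist[N] = 0
--     levels = [[N]]
--     while dist[K] == -1:
--         nxt = []
--         for p in levels[-1]:
--             for q in (p - 1, p + 1, 2 * p):
--                 if 0 <= q <= 100000 and dist[q] == -1:
--                     dist[q] = len(levels)
--                     nxt.append(q)
--         levels.append(nxt)
--
--     # Phase 2: count shortest paths by a pull-style DP over the levels:
--     # ways[p] = sum of ways over p's predecessors (p+1, p-1, p//2 if p even)
--     # that sit exactly one level closer to N.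
--     ways = [0] * 100001
--     ways[N] = 1
--     for lvl in levels[1:]:
--         for p in lvl:
--             w = 0
--             if p + 1 <= 100000 and dist[p + 1] == dist[p] - 1:
--                 w += ways[p + 1]
--             if p - 1 >= 0 and dist[p - 1] == dist[p] - 1:
--                 w += ways[p - 1]
--             if p % 2 == 0 and dist[p // 2] == dist[p] - 1:
--                 w += ways[p // 2]
--             ways[p] = w
--     return dist[K], ways[K]
-- ===== Notes on version B (the rewrite author's own statement) =====
-- stated objective: alternative
-- what changed: A counts shortest paths inside a single-queue BFS by pushing ways forward along every relaxed edge; B splits the work into two phases: a distance-only BFS that records the levels (stopping once K has a distance), then a pull-style DP that computes ways[p] as the sum of ways over p's predecessors (p+1, p-1, p//2 if even) one level closer - counting runs along reversed edges, separate from the traversal.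
-- outside the precondition, e.g. on find_fastest_path(-2, 5): A returns (-1, 0), B does not finish within the time limit
import Mathlib
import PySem

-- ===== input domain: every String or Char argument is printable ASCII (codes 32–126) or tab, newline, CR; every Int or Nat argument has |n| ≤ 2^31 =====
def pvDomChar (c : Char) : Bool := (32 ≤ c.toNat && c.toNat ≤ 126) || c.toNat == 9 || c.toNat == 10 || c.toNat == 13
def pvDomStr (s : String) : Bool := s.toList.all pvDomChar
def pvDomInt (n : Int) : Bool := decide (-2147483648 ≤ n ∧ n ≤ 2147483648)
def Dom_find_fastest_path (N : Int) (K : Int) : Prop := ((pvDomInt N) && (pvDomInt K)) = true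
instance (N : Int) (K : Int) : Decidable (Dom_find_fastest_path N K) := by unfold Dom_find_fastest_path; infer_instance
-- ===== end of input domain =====

-- B replaces A's single-queue BFS with interleaved path counting by a two-phase algorithm:
-- phase 1 is a distance-only BFS recording the levels (stopping once K has a distance),
-- phase 2 counts shortest paths by a pull-style DP over reversed edges (predecessors
-- p+1, p-1, p//2).  The Python lists visited/ways/dist are ported as Array Int; every
-- access the admitted inputs reach is guarded in range, exactly as in the Python.

-- array read `a[i]` / write `a[i] = t` for in-range indices (all accesses under Pre_ are in range)
def pvGet (a : Array Int) (i : Int) : Int := if 0 ≤ i then a.getD i.toNat 0 else 0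
def pvSet (a : Array Int) (i : Int) (t : Int) : Array Int :=
  if 0 ≤ i then a.setIfInBounds i.toNat t else a

-- ===== PORT A =====
-- one relaxation `for nx in [x-1, x+1, x*2]` body; state = (visited, ways, queue)
def pvRelaxA (x : Int) (st : Array Int × Array Int × List Int) (nx : Int) :
    Array Int × Array Int × List Int :=
  if 0 ≤ nx ∧ nx ≤ 100000 then
    if pvGet st.1 nx = 0 then
      (pvSet st.1 nx (pvGet st.1 x + 1), pvSet st.2.1 nx (pvGet st.2.1 x), st.2.2 ++ [nx])
    else if pvGet st.1 nx = pvGet st.1 x + 1 then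
      (st.1, pvSet st.2.1 nx (pvGet st.2.1 nx + pvGet st.2.1 x), st.2.2)
    else st
  else st

def pvStepA (v w : Array Int) (q : List Int) (x : Int) :
    Array Int × Array Int × List Int :=
  List.foldl (pvRelaxA x) (v, w, q) [x - 1, x + 1, x * 2]

-- the `while q:` loop; fuel only totalizes it (300004 iterations always suffice, see the
-- pvSC measure arithmetic in pvMain)
def pvRunA : Nat → Array Int → Array Int → List Int → Array Int × Array Int
  | 0, v, w, _ => (v, w)
  | _ + 1, v, w, [] => (v, w)
  | fuel + 1, v, w, x :: q =>
      let st := pvStepA v w q x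
      pvRunA fuel st.1 st.2.1 st.2.2

def find_fastest_path (N : Int) (K : Int) : Int × Int :=
  if N ≥ K then (N - K, 1)
  else
    let v0 := pvSet (Array.replicate 100001 0) N 1
    let w0 := pvSet (Array.replicate 100001 0) N 1
    let r := pvRunA 300004 v0 w0 [N]
    (pvGet r.1 K - 1, pvGet r.2 K)

-- ===== PORT B =====
-- phase 1, body of `for q in (p-1, p+1, 2*p)`; state = (dist, nxt)
def pvP1Relax (lvlsLen : Int) (st : Array Int × List Int) (q : Int) :
    Array Int × List Int :=
  if (0 ≤ q ∧ q ≤ 100000) ∧ pvGet st.1 q = -1 then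
    (pvSet st.1 q lvlsLen, st.2 ++ [q])
  else st

def pvP1Node (lvlsLen : Int) (st : Array Int × List Int) (p : Int) :
    Array Int × List Int :=
  List.foldl (pvP1Relax lvlsLen) st [p - 1, p + 1, 2 * p]

-- the `while dist[K] == -1:` loop; fuel only totalizes it (the distance of K is at most
-- 100000, so 100002 iterations always suffice under Pre_)
def pvP1Run : Nat → Array Int → List (List Int) → Int → Array Int × List (List Int)
  | 0, dist, levels, _ => (dist, levels)
  | fuel + 1, dist, levels, K =>
      if pvGet dist K = -1 then
        let st := List.foldl (pvP1Node (levels.length : Int)) (dist, []) (levels.getLastD [])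
        pvP1Run fuel st.1 (levels ++ [st.2]) K
      else (dist, levels)

-- phase 2, the pull at one position p (the three guarded predecessor reads)
def pvPull (dist ways : Array Int) (p : Int) : Int :=
  let w0 : Int := 0
  let w1 := if p + 1 ≤ 100000 ∧ pvGet dist (p + 1) = pvGet dist p - 1 then
      w0 + pvGet ways (p + 1) else w0
  let w2 := if 0 ≤ p - 1 ∧ pvGet dist (p - 1) = pvGet dist p - 1 then
      w1 + pvGet ways (p - 1) else w1
  if PySem.Int.mod p 2 = 0 ∧
      pvGet dist (PySem.Int.floordiv p 2) = pvGet dist p - 1 then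
    w2 + pvGet ways (PySem.Int.floordiv p 2) else w2

-- phase 2, `for p in lvl:`
def pvP2Lvl (dist : Array Int) (ways : Array Int) (lvl : List Int) : Array Int :=
  List.foldl (fun wa p => pvSet wa p (pvPull dist wa p)) ways lvl

def find_fastest_path_alt (N : Int) (K : Int) : Int × Int :=
  if N ≥ K then (N - K, 1)
  else
    let d0 := pvSet (Array.replicate 100001 (-1)) N 0
    let r := pvP1Run 100002 d0 [[N]] K
    let w0 := pvSet (Array.replicate 100001 0) N 1
    let wf := List.foldl (pvP2Lvl r.1) w0 (r.2.drop 1)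
    (pvGet r.1 K, pvGet wf K)

-- ===== PRECONDITION & SPEC =====
-- Pre_ excludes the inputs with N < K where N < 0 or K > 100000: there A either raises
-- IndexError (N < -100001, or K > 100000 at the final visited[K] lookup) or returns a value
-- produced by Python's negative-index wraparound (visited[N] silently marks cell 100001+N),
-- where B's phase-1 loop does not terminate for N ≤ -2.
def Pre_find_fastest_path (N : Int) (K : Int) : Prop :=
  K ≤ N ∨ (0 ≤ N ∧ K ≤ 100000)
instance (N : Int) (K : Int) : Decidable (Pre_find_fastest_path N K) := by
  unfold Pre_find_fastest_path; infer_instance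

def pvWitness_find_fastest_path : Int × Int := (3, 10)

def Spec_find_fastest_path (N : Int) (K : Int) (out : Int × Int) : Prop :=
  out = find_fastest_path_alt N K
instance (N : Int) (K : Int) (out : Int × Int) : Decidable (Spec_find_fastest_path N K out) := by
  unfold Spec_find_fastest_path; infer_instance

-- ===== CLAIM (what is proved, stated in full; the proofs are below) =====
def Claim_equal_find_fastest_path : Prop :=
  ∀ (N : Int) (K : Int), Dom_find_fastest_path N K → Pre_find_fastest_path N K →
    Spec_find_fastest_path N K (find_fastest_path N K)

-- ===== LEMMAS AND PROOFS =====

lemma pvSet_size (a : Array Int) (i t : Int) : (pvSet a i t).size = a.size := by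
  unfold pvSet
  split_ifs
  · exact Array.size_setIfInBounds
  · rfl

lemma pvGet_pvSet (a : Array Int) (i j t : Int) (hsz : a.size = 100001)
    (h0 : 0 ≤ i) (h1 : i ≤ 100000) :
    pvGet (pvSet a i t) j = if j = i then t else pvGet a j := by
  unfold pvGet pvSet
  rw [if_pos h0]
  by_cases hj : 0 ≤ j
  · rw [if_pos hj, Array.getD_eq_getD_getElem?, Array.getElem?_setIfInBounds]
    by_cases hij : j = i
    · rw [if_pos (by omega : i.toNat = j.toNat), if_pos (by omega : i.toNat < a.size),
        if_pos hij]
      rfl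
    · rw [if_neg (by omega : ¬ i.toNat = j.toNat), if_neg hij, if_pos hj,
        Array.getD_eq_getD_getElem?]
  · rw [if_neg hj, if_neg (by omega : ¬ j = i), if_neg hj]

lemma pvGet_replicate (c j : Int) :
    pvGet (Array.replicate 100001 c) j = if 0 ≤ j ∧ j ≤ 100000 then c else 0 := by
  unfold pvGet
  by_cases hj : 0 ≤ j
  · rw [if_pos hj, Array.getD_eq_getD_getElem?, Array.getElem?_replicate]
    by_cases hlt : j.toNat < 100001
    · rw [if_pos hlt, if_pos (by omega)]
      rfl
    · rw [if_neg hlt, if_neg (by omega)]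
      rfl
  · rw [if_neg hj, if_neg (by omega)]

-- number of marked cells of the board 0..100000 (the termination measure's core)
def pvSC (v : Array Int) : Nat :=
  ((Finset.range 100001).filter (fun i : ℕ => pvGet v (i : Int) ≠ 0)).card

lemma pvSC_le (v : Array Int) : pvSC v ≤ 100001 := by
  unfold pvSC
  calc ((Finset.range 100001).filter (fun i : ℕ => pvGet v (i : Int) ≠ 0)).card
      ≤ (Finset.range 100001).card := Finset.card_filter_le _ _
    _ = 100001 := Finset.card_range _

lemma pvSC_update (v : Array Int) (nx t : Int) (hsz : v.size = 100001)
    (h0 : 0 ≤ nx) (h1 : nx ≤ 100000)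
    (hz : pvGet v nx = 0) (ht : t ≠ 0) : pvSC (pvSet v nx t) = pvSC v + 1 := by
  unfold pvSC
  have hfe : (Finset.range 100001).filter (fun i : ℕ => pvGet (pvSet v nx t) (i : Int) ≠ 0)
      = insert nx.toNat ((Finset.range 100001).filter (fun i : ℕ => pvGet v (i : Int) ≠ 0)) := by
    ext i
    simp only [Finset.mem_filter, Finset.mem_range, Finset.mem_insert]
    rw [pvGet_pvSet v nx (i : Int) t hsz h0 h1]
    by_cases hi : (i : Int) = nx
    · rw [if_pos hi]
      constructor
      · intro _
        exact Or.inl (by omega)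
      · intro _
        exact ⟨by omega, ht⟩
    · rw [if_neg hi]
      constructor
      · intro h
        exact Or.inr h
      · intro h
        rcases h with h | h
        · exact absurd h (by omega)
        · exact h
  rw [hfe, Finset.card_insert_of_notMem]
  simp only [Finset.mem_filter, Finset.mem_range, not_and, ne_eq, not_not]
  intro _
  rwa [show ((nx.toNat : Int)) = nx by omega]

-- contribution of the processed neighbour-expressions of one node x to cell p
def pvContrib (w : Array Int) (x : Int) (ns : List Int) (p : Int) : Int :=
  (ns.map (fun e => if e = p then pvGet w x else 0)).sum

-- total push of a processed prefix P of the frontier into cell p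
def pvPush (w : Array Int) (P : List Int) (p : Int) : Int :=
  (P.map (fun q => pvContrib w q [q - 1, q + 1, q * 2] p)).sum

lemma pvContrib_nil (w : Array Int) (x p : Int) : pvContrib w x [] p = 0 := rfl

lemma pvContrib_append (w : Array Int) (x : Int) (ns : List Int) (e p : Int) :
    pvContrib w x (ns ++ [e]) p
      = pvContrib w x ns p + (if e = p then pvGet w x else 0) := by
  unfold pvContrib
  rw [List.map_append, List.sum_append]
  simp

lemma pvContrib_zero (w : Array Int) (x : Int) (ns : List Int) (p : Int)
    (h : p ∉ ns) : pvContrib w x ns p = 0 := by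
  induction ns with
  | nil => rfl
  | cons e ns ih =>
      unfold pvContrib
      simp only [List.map_cons, List.sum_cons]
      rw [if_neg (by intro he; exact h (by simp [he]))]
      have := ih (by intro hm; exact h (by simp [hm]))
      unfold pvContrib at this
      omega

lemma pvPush_nil (w : Array Int) (p : Int) : pvPush w [] p = 0 := rfl

lemma pvPush_append (w : Array Int) (P : List Int) (x p : Int) :
    pvPush w (P ++ [x]) p = pvPush w P p + pvContrib w x [x - 1, x + 1, x * 2] p := by
  unfold pvPush
  rw [List.map_append, List.sum_append]
  simp

lemma pvContrib_three (w : Array Int) (q p : Int) :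
    pvContrib w q [q - 1, q + 1, q * 2] p
      = (if q - 1 = p then pvGet w q else 0) + (if q + 1 = p then pvGet w q else 0)
        + (if q * 2 = p then pvGet w q else 0) := by
  unfold pvContrib
  simp [add_assoc]

-- the push over a duplicate-free frontier L collapses to the three predecessor reads
lemma pvPush_eval (w : Array Int) (L : List Int) (p : Int) (hnd : L.Nodup) :
    pvPush w L p = (if p + 1 ∈ L then pvGet w (p + 1) else 0)
      + (if p - 1 ∈ L then pvGet w (p - 1) else 0)
      + (if p % 2 = 0 ∧ p / 2 ∈ L then pvGet w (p / 2) else 0) := by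
  induction L with
  | nil => simp [pvPush_nil]
  | cons q L ih =>
      have hnd' : L.Nodup := hnd.of_cons
      have hqL : q ∉ L := (List.nodup_cons.mp hnd).1
      have hstep : pvPush w (q :: L) p
          = pvContrib w q [q - 1, q + 1, q * 2] p + pvPush w L p := by
        unfold pvPush
        simp
      have h1 : (if p + 1 ∈ q :: L then pvGet w (p + 1) else 0)
          = (if q - 1 = p then pvGet w q else 0) + (if p + 1 ∈ L then pvGet w (p + 1) else 0) := by
        by_cases hq : q = p + 1
        · subst hq
          rw [if_pos (List.mem_cons_self), if_pos (show p + 1 - 1 = p by ring), if_neg hqL]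
          ring
        · have hm : (p + 1 ∈ q :: L) ↔ (p + 1 ∈ L) := by
            rw [List.mem_cons]
            constructor
            · rintro (h | h)
              · exact absurd h.symm hq
              · exact h
            · exact Or.inr
          rw [if_congr hm rfl rfl, if_neg (show ¬ (q - 1 = p) from fun h => hq (by omega))]
          ring
      have h2 : (if p - 1 ∈ q :: L then pvGet w (p - 1) else 0)
          = (if q + 1 = p then pvGet w q else 0) + (if p - 1 ∈ L then pvGet w (p - 1) else 0) := by
        by_cases hq : q = p - 1
        · subst hq
          rw [if_pos (List.mem_cons_self), if_pos (show p - 1 + 1 = p by ring), if_neg hqL]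
          ring
        · have hm : (p - 1 ∈ q :: L) ↔ (p - 1 ∈ L) := by
            rw [List.mem_cons]
            constructor
            · rintro (h | h)
              · exact absurd h.symm hq
              · exact h
            · exact Or.inr
          rw [if_congr hm rfl rfl, if_neg (show ¬ (q + 1 = p) from fun h => hq (by omega))]
          ring
      have h3 : (if p % 2 = 0 ∧ p / 2 ∈ q :: L then pvGet w (p / 2) else 0)
          = (if q * 2 = p then pvGet w q else 0)
            + (if p % 2 = 0 ∧ p / 2 ∈ L then pvGet w (p / 2) else 0) := by
        by_cases hq : q * 2 = p
        · have hpar : p % 2 = 0 := by omega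
          have hdiv : p / 2 = q := by omega
          rw [if_pos (show p % 2 = 0 ∧ p / 2 ∈ q :: L from
              ⟨hpar, by rw [hdiv]; exact List.mem_cons_self⟩), if_pos hq,
            if_neg (show ¬ (p % 2 = 0 ∧ p / 2 ∈ L) from fun hc => hqL (hdiv ▸ hc.2)), hdiv]
          ring
        · have hm : (p % 2 = 0 ∧ p / 2 ∈ q :: L) ↔ (p % 2 = 0 ∧ p / 2 ∈ L) := by
            constructor
            · rintro ⟨hpar, hm⟩
              refine ⟨hpar, ?_⟩
              rcases List.mem_cons.mp hm with he | he
              · exact absurd (show q * 2 = p by omega) hq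
              · exact he
            · rintro ⟨hpar, hm⟩
              exact ⟨hpar, List.mem_cons_of_mem _ hm⟩
          rw [if_congr hm rfl rfl, if_neg hq]
          ring
      rw [hstep, ih hnd', pvContrib_three, h1, h2, h3]
      ring

-- if every processed node's in-range neighbours are marked, nothing has been pushed
-- into a still-unmarked in-range cell
lemma pvPush_zero (w v' : Array Int) (P : List Int) (p : Int)
    (hcl : ∀ q ∈ P, ∀ e ∈ ([q - 1, q + 1, q * 2] : List Int),
      0 ≤ e → e ≤ 100000 → pvGet v' e ≠ 0)
    (hp0 : 0 ≤ p) (hp1 : p ≤ 100000) (hz : pvGet v' p = 0) : pvPush w P p = 0 := by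
  induction P with
  | nil => rfl
  | cons q P ih =>
      have hstep : pvPush w (q :: P) p
          = pvContrib w q [q - 1, q + 1, q * 2] p + pvPush w P p := by
        unfold pvPush
        simp
      rw [hstep, pvContrib_three]
      have hq := hcl q (by simp)
      have e1 : ¬ (q - 1 = p) := by
        intro h
        exact hq (q - 1) (by simp) (by omega) (by omega) (by rw [h]; exact hz)
      have e2 : ¬ (q + 1 = p) := by
        intro h
        exact hq (q + 1) (by simp) (by omega) (by omega) (by rw [h]; exact hz)
      have e3 : ¬ (q * 2 = p) := by
        intro h
        exact hq (q * 2) (by simp) (by omega) (by omega) (by rw [h]; exact hz)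
      rw [if_neg e1, if_neg e2, if_neg e3, ih (fun q' hq' => hcl q' (by simp [hq']))]
      ring

-- ===== A-side queue bookkeeping =====

lemma pvRelaxA_q (x : Int) (v w : Array Int) (q : List Int) (nx : Int) :
    pvRelaxA x (v, w, q) nx =
      ((pvRelaxA x (v, w, []) nx).1, (pvRelaxA x (v, w, []) nx).2.1,
        q ++ (pvRelaxA x (v, w, []) nx).2.2) := by
  unfold pvRelaxA
  split_ifs <;> simp

lemma pvFold_q (x : Int) : ∀ (ns : List Int) (v w : Array Int) (q : List Int),
    List.foldl (pvRelaxA x) (v, w, q) ns =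
      ((List.foldl (pvRelaxA x) (v, w, []) ns).1, (List.foldl (pvRelaxA x) (v, w, []) ns).2.1,
        q ++ (List.foldl (pvRelaxA x) (v, w, []) ns).2.2) := by
  intro ns
  induction ns with
  | nil => intro v w q; simp
  | cons n ns ih =>
      intro v w q
      simp only [List.foldl_cons]
      rw [pvRelaxA_q]
      rw [ih (pvRelaxA x (v, w, []) n).1 (pvRelaxA x (v, w, []) n).2.1
        (q ++ (pvRelaxA x (v, w, []) n).2.2)]
      rw [ih (pvRelaxA x (v, w, []) n).1 (pvRelaxA x (v, w, []) n).2.1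
        ((pvRelaxA x (v, w, []) n).2.2)]
      simp

lemma pvStepA_queue (v w : Array Int) (q : List Int) (x : Int) :
    pvStepA v w q x =
      ((pvStepA v w [] x).1, (pvStepA v w [] x).2.1, q ++ (pvStepA v w [] x).2.2) := by
  unfold pvStepA
  rw [pvFold_q]

def pvLvlStep (st : Array Int × Array Int × List Int) (x : Int) :
    Array Int × Array Int × List Int :=
  pvStepA st.1 st.2.1 st.2.2 x

-- A's queue loop, split at a level boundary: popping P one by one is a fold over P
lemma pvRunA_chunk : ∀ (P : List Int) (fuel : Nat) (v w : Array Int) (E : List Int),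
    P.length ≤ fuel →
    pvRunA fuel v w (P ++ E) =
      pvRunA (fuel - P.length) (List.foldl pvLvlStep (v, w, E) P).1
        (List.foldl pvLvlStep (v, w, E) P).2.1 (List.foldl pvLvlStep (v, w, E) P).2.2 := by
  intro P
  induction P with
  | nil => intro fuel v w E h; simp
  | cons x P ih =>
      intro fuel v w E h
      cases fuel with
      | zero => simp at h
      | succ f =>
          simp only [List.cons_append, pvRunA]
          rw [pvStepA_queue v w (P ++ E) x]
          rw [List.append_assoc]
          have := ih f (pvStepA v w [] x).1 (pvStepA v w [] x).2.1
            (E ++ (pvStepA v w [] x).2.2) (by simpa using h)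
          rw [this]
          have hstep : pvLvlStep (v, w, E) x =
              ((pvStepA v w [] x).1, (pvStepA v w [] x).2.1, E ++ (pvStepA v w [] x).2.2) := by
            unfold pvLvlStep
            exact pvStepA_queue v w E x
          simp only [List.foldl_cons, hstep, List.length_cons]
          congr 1
          omega

lemma pvRelaxA_size (x : Int) (st : Array Int × Array Int × List Int) (nx : Int) :
    (pvRelaxA x st nx).1.size = st.1.size ∧ (pvRelaxA x st nx).2.1.size = st.2.1.size := by
  unfold pvRelaxA
  split_ifs <;> simp [pvSet_size]

lemma pvLvlStep_size (st : Array Int × Array Int × List Int) (x : Int) :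
    (pvLvlStep st x).1.size = st.1.size ∧ (pvLvlStep st x).2.1.size = st.2.1.size := by
  unfold pvLvlStep pvStepA
  generalize ([x - 1, x + 1, x * 2] : List Int) = ns
  induction ns generalizing st with
  | nil => exact ⟨rfl, rfl⟩
  | cons n ns ihn =>
      simp only [List.foldl_cons]
      have h1 := pvRelaxA_size x st n
      have h2 := ihn (pvRelaxA x st n)
      exact ⟨h2.1.trans h1.1, h2.2.trans h1.2⟩

lemma pvStep_pres (v w : Array Int) (q : List Int) (x y : Int)
    (hszv : v.size = 100001) (hszw : w.size = 100001)
    (h3 : 1 ≤ pvGet v y) (h2 : pvGet v y ≤ pvGet v x) :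
    pvGet (pvStepA v w q x).1 y = pvGet v y ∧ pvGet (pvStepA v w q x).2.1 y = pvGet w y ∧
    (∀ z, pvGet (pvStepA v w q x).1 z = pvGet v z ∨
      (pvGet v z = 0 ∧ pvGet (pvStepA v w q x).1 z = pvGet v x + 1)) ∧
    ∃ new, (pvStepA v w q x).2.2 = q ++ new ∧
      ∀ z ∈ new, pvGet (pvStepA v w q x).1 z = pvGet v x + 1 := by
  have hx1 : (1:Int) ≤ pvGet v x := le_trans h3 h2
  unfold pvStepA
  suffices h : ∀ (ns : List Int) (s : Array Int × Array Int × List Int),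
      (s.1.size = 100001 ∧ s.2.1.size = 100001 ∧
        pvGet s.1 y = pvGet v y ∧ pvGet s.2.1 y = pvGet w y ∧
        (∀ z, pvGet s.1 z = pvGet v z ∨ (pvGet v z = 0 ∧ pvGet s.1 z = pvGet v x + 1)) ∧
        pvGet s.1 x = pvGet v x ∧
        ∃ new, s.2.2 = q ++ new ∧ ∀ z ∈ new, pvGet s.1 z = pvGet v x + 1) →
      (pvGet (List.foldl (pvRelaxA x) s ns).1 y = pvGet v y ∧
        pvGet (List.foldl (pvRelaxA x) s ns).2.1 y = pvGet w y ∧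
        (∀ z, pvGet (List.foldl (pvRelaxA x) s ns).1 z = pvGet v z ∨
          (pvGet v z = 0 ∧ pvGet (List.foldl (pvRelaxA x) s ns).1 z = pvGet v x + 1)) ∧
        pvGet (List.foldl (pvRelaxA x) s ns).1 x = pvGet v x ∧
        ∃ new, (List.foldl (pvRelaxA x) s ns).2.2 = q ++ new ∧
          ∀ z ∈ new, pvGet (List.foldl (pvRelaxA x) s ns).1 z = pvGet v x + 1) by
    have := h [x - 1, x + 1, x * 2] (v, w, q)
      ⟨hszv, hszw, rfl, rfl, fun z => Or.inl rfl, rfl, [], by simp, by simp⟩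
    exact ⟨this.1, this.2.1, this.2.2.1, this.2.2.2.2⟩
  intro ns
  induction ns with
  | nil => intro s hs; exact ⟨hs.2.2.1, hs.2.2.2.1, hs.2.2.2.2.1, hs.2.2.2.2.2.1, hs.2.2.2.2.2.2⟩
  | cons n ns ihn =>
      intro s hs
      obtain ⟨hs1, hs2, hy, hwy, hall, hxx, new, hq, hnew⟩ := hs
      simp only [List.foldl_cons]
      apply ihn
      refine ⟨(pvRelaxA_size x s n).1.trans hs1, (pvRelaxA_size x s n).2.trans hs2, ?_⟩
      unfold pvRelaxA
      split_ifs with hr hz he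
      · -- discovery
        have hyn : y ≠ n := fun h => by rw [← h] at hz; rw [hy] at hz; omega
        have hxn : x ≠ n := fun h => by rw [← h] at hz; rw [hxx] at hz; omega
        refine ⟨?_, ?_, ?_, ?_, new ++ [n], by simp [hq], ?_⟩
        · show pvGet (pvSet s.1 n (pvGet s.1 x + 1)) y = pvGet v y
          rw [pvGet_pvSet s.1 n y _ hs1 hr.1 hr.2, if_neg hyn, hy]
        · show pvGet (pvSet s.2.1 n (pvGet s.2.1 x)) y = pvGet w y
          rw [pvGet_pvSet s.2.1 n y _ hs2 hr.1 hr.2, if_neg hyn, hwy]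
        · intro z
          show pvGet (pvSet s.1 n (pvGet s.1 x + 1)) z = pvGet v z ∨ _
          rw [pvGet_pvSet s.1 n z _ hs1 hr.1 hr.2]
          by_cases hzn : z = n
          · rw [if_pos hzn, hxx]
            right
            subst hzn
            rcases hall z with h | h
            · exact ⟨by rw [← h, hz], rfl⟩
            · exact ⟨h.1, rfl⟩
          · rw [if_neg hzn]
            exact hall z
        · show pvGet (pvSet s.1 n (pvGet s.1 x + 1)) x = pvGet v x
          rw [pvGet_pvSet s.1 n x _ hs1 hr.1 hr.2, if_neg hxn, hxx]
        · intro z hz2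
          show pvGet (pvSet s.1 n (pvGet s.1 x + 1)) z = pvGet v x + 1
          simp only [List.mem_append, List.mem_singleton] at hz2
          rw [pvGet_pvSet s.1 n z _ hs1 hr.1 hr.2]
          rcases hz2 with hz2 | hz2
          · have hval : pvGet s.1 z = pvGet v x + 1 := hnew z hz2
            have hzn : z ≠ n := fun h => by rw [← h] at hz; rw [hval] at hz; omega
            rw [if_neg hzn, hval]
          · subst hz2
            rw [if_pos rfl, hxx]
      · -- accumulate into an already-discovered next-level node
        have hyn : y ≠ n := by
          intro h
          rw [← h] at he
          rw [hy, hxx] at he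
          omega
        refine ⟨hy, ?_, hall, hxx, new, hq, hnew⟩
        show pvGet (pvSet s.2.1 n (pvGet s.2.1 n + pvGet s.2.1 x)) y = pvGet w y
        rw [pvGet_pvSet s.2.1 n y _ hs2 hr.1 hr.2, if_neg hyn, hwy]
      · exact ⟨hy, hwy, hall, hxx, new, hq, hnew⟩
      · exact ⟨hy, hwy, hall, hxx, new, hq, hnew⟩

-- stability: once y is visited and every queued node is at least as deep, (visited y, ways y) is final
lemma pvRunA_stable : ∀ (fuel : Nat) (v w : Array Int) (q : List Int) (y : Int),
    v.size = 100001 → w.size = 100001 →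
    1 ≤ pvGet v y → (∀ x ∈ q, pvGet v y ≤ pvGet v x) →
    pvGet (pvRunA fuel v w q).1 y = pvGet v y ∧ pvGet (pvRunA fuel v w q).2 y = pvGet w y := by
  intro fuel
  induction fuel with
  | zero => intro v w q y _ _ h1 h2; exact ⟨rfl, rfl⟩
  | succ f ih =>
      intro v w q y hszv hszw h1 h2
      cases q with
      | nil => exact ⟨rfl, rfl⟩
      | cons x q =>
          simp only [pvRunA]
          have hx : pvGet v y ≤ pvGet v x := h2 x (by simp)
          obtain ⟨hy, hwy, hall, new, hq, hnew⟩ := pvStep_pres v w q x y hszv hszw h1 hx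
          have hsz1 : (pvStepA v w q x).1.size = 100001 := by
            have := pvLvlStep_size (v, w, q) x
            exact this.1.trans hszv
          have hsz2 : (pvStepA v w q x).2.1.size = 100001 := by
            have := pvLvlStep_size (v, w, q) x
            exact this.2.trans hszw
          have := ih (pvStepA v w q x).1 (pvStepA v w q x).2.1 (pvStepA v w q x).2.2 y
            hsz1 hsz2 (by rw [hy]; exact h1)
            (by
              intro z hz
              rw [hy, hq] at *
              simp only [List.mem_append] at hz
              rcases hz with hz | hz
              · have hvz : pvGet v y ≤ pvGet v z := h2 z (by simp [hz])
                rcases hall z with h | h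
                · rw [h]; exact hvz
                · rw [h.2]; omega
              · rw [hnew z hz]; omega)
          rw [this.1, this.2, hy, hwy]
          exact ⟨rfl, rfl⟩

-- ===== B-side phase-1 run bookkeeping =====

lemma pvP1Relax_size (l : Int) (st : Array Int × List Int) (q : Int) :
    (pvP1Relax l st q).1.size = st.1.size := by
  unfold pvP1Relax
  split_ifs <;> simp [pvSet_size]

lemma pvP1Relax_dist (l : Int) (st : Array Int × List Int) (q y : Int)
    (hsz : st.1.size = 100001) :
    pvGet (pvP1Relax l st q).1 y = pvGet st.1 y ∨
      (pvGet st.1 y = -1 ∧ pvGet (pvP1Relax l st q).1 y = l) := by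
  unfold pvP1Relax
  split_ifs with h
  · show pvGet (pvSet st.1 q l) y = _ ∨ _
    rw [pvGet_pvSet st.1 q y l hsz h.1.1 h.1.2]
    by_cases hyq : y = q
    · rw [if_pos hyq]
      right
      exact ⟨hyq ▸ h.2, rfl⟩
    · rw [if_neg hyq]
      exact Or.inl rfl
  · exact Or.inl rfl

lemma pvP1RelaxFold_dist (l : Int) : ∀ (ns : List Int) (st : Array Int × List Int) (y : Int),
    st.1.size = 100001 →
    (List.foldl (pvP1Relax l) st ns).1.size = 100001 ∧
    (pvGet (List.foldl (pvP1Relax l) st ns).1 y = pvGet st.1 y ∨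
      (pvGet st.1 y = -1 ∧ pvGet (List.foldl (pvP1Relax l) st ns).1 y = l)) := by
  intro ns
  induction ns with
  | nil => intro st y h; exact ⟨h, Or.inl rfl⟩
  | cons n ns ih =>
      intro st y hsz
      simp only [List.foldl_cons]
      have h1 := pvP1Relax_dist l st n y hsz
      have h2 := ih (pvP1Relax l st n) y (by rw [pvP1Relax_size]; exact hsz)
      refine ⟨h2.1, ?_⟩
      rcases h2.2 with h2' | h2'
      · rw [h2']
        exact h1
      · rcases h1 with h1' | h1'
        · right
          exact ⟨by rw [← h1']; exact h2'.1, h2'.2⟩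
        · right
          exact ⟨h1'.1, h2'.2⟩

lemma pvP1Lvl_dist (l : Int) : ∀ (L : List Int) (st : Array Int × List Int) (y : Int),
    st.1.size = 100001 →
    (List.foldl (pvP1Node l) st L).1.size = 100001 ∧
    (pvGet (List.foldl (pvP1Node l) st L).1 y = pvGet st.1 y ∨
      (pvGet st.1 y = -1 ∧ pvGet (List.foldl (pvP1Node l) st L).1 y = l)) := by
  intro L
  induction L with
  | nil => intro st y h; exact ⟨h, Or.inl rfl⟩
  | cons x L ih =>
      intro st y hsz
      simp only [List.foldl_cons]
      have h1 := pvP1RelaxFold_dist l [x - 1, x + 1, 2 * x] st y hsz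
      have h2 := ih (pvP1Node l st x) y (by
        show (List.foldl (pvP1Relax l) st [x - 1, x + 1, 2 * x]).1.size = 100001
        exact h1.1)
      refine ⟨h2.1, ?_⟩
      have h1' := h1.2
      rcases h2.2 with h2' | h2'
      · rw [h2']
        exact h1'
      · rcases h1' with h1'' | h1''
        · right
          exact ⟨by rw [← h1'']; exact h2'.1, h2'.2⟩
        · right
          exact ⟨h1''.1, h2'.2⟩

-- final dist: already-set cells are stable; still-unset cells end at -1 or at a later level index
lemma pvP1Run_dist : ∀ (f : Nat) (dist : Array Int) (levels : List (List Int)) (K y : Int),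
    dist.size = 100001 →
    (pvP1Run f dist levels K).1.size = 100001 ∧
    (pvGet (pvP1Run f dist levels K).1 y = pvGet dist y ∨
      (pvGet dist y = -1 ∧ (levels.length : Int) ≤ pvGet (pvP1Run f dist levels K).1 y)) := by
  intro f
  induction f with
  | zero => intro dist levels K y h; exact ⟨h, Or.inl rfl⟩
  | succ f ih =>
      intro dist levels K y hsz
      simp only [pvP1Run]
      split_ifs with hK
      · have h1 := pvP1Lvl_dist (levels.length : Int) (levels.getLastD []) (dist, []) y hsz
        have h2 := ih (List.foldl (pvP1Node (levels.length : Int)) (dist, []) (levels.getLastD [])).1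
          (levels ++ [(List.foldl (pvP1Node (levels.length : Int)) (dist, []) (levels.getLastD [])).2])
          K y h1.1
        refine ⟨h2.1, ?_⟩
        simp only [List.length_append, List.length_cons, List.length_nil] at h2
        rcases h2.2 with h2' | h2'
        · rw [h2']
          rcases h1.2 with h1' | h1'
          · exact Or.inl h1'
          · right
            refine ⟨h1'.1, ?_⟩
            rw [h1'.2]
        · rcases h1.2 with h1' | h1'
          · right
            refine ⟨by rw [← h1']; exact h2'.1, ?_⟩
            have := h2'.2
            push_cast at this ⊢
            omega
          · right
            refine ⟨h1'.1, ?_⟩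
            have := h2'.2
            push_cast at this ⊢
            omega
      · exact ⟨hsz, Or.inl rfl⟩

lemma pvP1Run_prefix : ∀ (f : Nat) (dist : Array Int) (levels : List (List Int)) (K : Int),
    ∃ fut, (pvP1Run f dist levels K).2 = levels ++ fut := by
  intro f
  induction f with
  | zero => intro dist levels K; exact ⟨[], by simp [pvP1Run]⟩
  | succ f ih =>
      intro dist levels K
      simp only [pvP1Run]
      split_ifs with hK
      · obtain ⟨fut, hfut⟩ := ih
          (List.foldl (pvP1Node (levels.length : Int)) (dist, []) (levels.getLastD [])).1
          (levels ++ [(List.foldl (pvP1Node (levels.length : Int)) (dist, []) (levels.getLastD [])).2]) K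
        exact ⟨[(List.foldl (pvP1Node (levels.length : Int)) (dist, []) (levels.getLastD [])).2] ++ fut,
          by rw [hfut, List.append_assoc]⟩
      · exact ⟨[], by simp⟩

-- ===== lockstep of A's level fold with B's phase-1 fold, carrying push bookkeeping =====

-- mid-node invariant: x's neighbour prefix `done` processed; P = fully processed frontier prefix
def pvNInv (d : Int) (v w : Array Int) (P : List Int) (x : Int) (done : List Int)
    (v' w' : Array Int) (E : List Int) (dist' : Array Int) : Prop :=
  v'.size = 100001 ∧ w'.size = 100001 ∧ dist'.size = 100001 ∧
  (∀ y, 0 ≤ y → y ≤ 100000 → pvGet v' y = pvGet dist' y + 1) ∧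
  (∀ y, y ∉ E → pvGet v' y = pvGet v y ∧ pvGet w' y = pvGet w y) ∧
  (∀ y, y ∈ E ↔ pvGet v' y = d + 2) ∧
  (∀ y ∈ E, 0 ≤ y ∧ y ≤ 100000 ∧ pvGet v y = 0) ∧
  E.Nodup ∧
  (∀ p ∈ E, pvGet w' p = pvPush w P p + pvContrib w x done p) ∧
  (∀ q ∈ P, ∀ e ∈ ([q - 1, q + 1, q * 2] : List Int),
    0 ≤ e → e ≤ 100000 → pvGet v' e ≠ 0) ∧
  (∀ e ∈ done, 0 ≤ e → e ≤ 100000 → pvGet v' e ≠ 0) ∧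
  pvSC v' = pvSC v + E.length

-- level invariant: P processed, between nodes
def pvMInv2 (d : Int) (v w : Array Int) (P : List Int)
    (v' w' : Array Int) (E : List Int) (dist' : Array Int) : Prop :=
  v'.size = 100001 ∧ w'.size = 100001 ∧ dist'.size = 100001 ∧
  (∀ y, 0 ≤ y → y ≤ 100000 → pvGet v' y = pvGet dist' y + 1) ∧
  (∀ y, y ∉ E → pvGet v' y = pvGet v y ∧ pvGet w' y = pvGet w y) ∧
  (∀ y, y ∈ E ↔ pvGet v' y = d + 2) ∧
  (∀ y ∈ E, 0 ≤ y ∧ y ≤ 100000 ∧ pvGet v y = 0) ∧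
  E.Nodup ∧
  (∀ p ∈ E, pvGet w' p = pvPush w P p) ∧
  (∀ q ∈ P, ∀ e ∈ ([q - 1, q + 1, q * 2] : List Int),
    0 ≤ e → e ≤ 100000 → pvGet v' e ≠ 0) ∧
  pvSC v' = pvSC v + E.length

set_option maxRecDepth 8192 in
-- heart: one neighbour of one frontier node, A's relaxation vs B's phase-1 relaxation
lemma pvNbr2 (d : Int) (v w : Array Int) (P : List Int) (x : Int) (done : List Int) (nx : Int)
    (hd : 0 ≤ d) (hvx : pvGet v x = d + 1)
    (v' w' : Array Int) (E : List Int) (dist' : Array Int)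
    (hM : pvNInv d v w P x done v' w' E dist') :
    pvNInv d v w P x (done ++ [nx]) (pvRelaxA x (v', w', E) nx).1
      (pvRelaxA x (v', w', E) nx).2.1 (pvRelaxA x (v', w', E) nx).2.2
      (pvP1Relax (d + 1) (dist', E) nx).1 ∧
    (pvP1Relax (d + 1) (dist', E) nx).2 = (pvRelaxA x (v', w', E) nx).2.2 := by
  obtain ⟨s1, s2, s3, mrel, m3, m4, m5, mnd, mpush, mclP, mclD, m7⟩ := hM
  have hxE : x ∉ E := by
    intro h
    have := (m5 x h).2.2
    omega
  have hvx' : pvGet v' x = d + 1 := by rw [(m3 x hxE).1, hvx]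
  have hwx' : pvGet w' x = pvGet w x := (m3 x hxE).2
  by_cases hr : 0 ≤ nx ∧ nx ≤ 100000
  · have hDnx : pvGet dist' nx = pvGet v' nx - 1 := by
      have := mrel nx hr.1 hr.2
      omega
    by_cases hz : pvGet v' nx = 0
    · -- fresh: both discover
      have hnxE : nx ∉ E := fun h => by
        have := (m4 nx).1 h
        omega
      have hnxdone : nx ∉ done := fun h => (mclD nx h hr.1 hr.2) hz
      have hA : pvRelaxA x (v', w', E) nx =
          (pvSet v' nx (pvGet v' x + 1), pvSet w' nx (pvGet w' x), E ++ [nx]) := by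
        unfold pvRelaxA
        rw [if_pos hr, if_pos hz]
      have hB : pvP1Relax (d + 1) (dist', E) nx = (pvSet dist' nx (d + 1), E ++ [nx]) := by
        unfold pvP1Relax
        rw [if_pos ⟨hr, by rw [hDnx, hz]; norm_num⟩]
      rw [hA, hB]
      have hgv : ∀ y, pvGet (pvSet v' nx (pvGet v' x + 1)) y =
          if y = nx then d + 2 else pvGet v' y := by
        intro y
        rw [pvGet_pvSet v' nx y _ s1 hr.1 hr.2, hvx']
        split_ifs <;> [ring_nf; rfl]
      refine ⟨⟨?_, ?_, ?_, ?_, ?_, ?_, ?_, ?_, ?_, ?_, ?_, ?_⟩, rfl⟩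
      · rw [pvSet_size]; exact s1
      · rw [pvSet_size]; exact s2
      · rw [pvSet_size]; exact s3
      · intro y hy0 hy1
        rw [hgv y, pvGet_pvSet dist' nx y _ s3 hr.1 hr.2]
        split_ifs
        · ring
        · exact mrel y hy0 hy1
      · intro y hy
        simp only [List.mem_append, List.mem_singleton, not_or] at hy
        rw [hgv y, if_neg hy.2, pvGet_pvSet w' nx y _ s2 hr.1 hr.2, if_neg hy.2]
        exact m3 y hy.1
      · intro y
        rw [hgv y]
        constructor
        · intro hy
          rcases List.mem_append.1 hy with hy | hy
          · have : y ≠ nx := fun h => hnxE (h ▸ hy)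
            rw [if_neg this]
            exact (m4 y).1 hy
          · simp only [List.mem_singleton] at hy
            rw [if_pos hy]
        · intro hy
          by_cases hynx : y = nx
          · simp [hynx]
          · rw [if_neg hynx] at hy
            exact List.mem_append_left _ ((m4 y).2 hy)
      · intro y hy
        rcases List.mem_append.1 hy with hy | hy
        · exact m5 y hy
        · simp only [List.mem_singleton] at hy
          subst hy
          exact ⟨hr.1, hr.2, by rw [← (m3 y hnxE).1]; exact hz⟩
      · simp only [List.nodup_append, mnd, List.nodup_singleton, true_and]
        intro a ha b hb hab
        have hb' : b = nx := by simpa using hb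
        exact hnxE (by rw [← hb', ← hab]; exact ha)
      · -- push bookkeeping
        intro p hp
        rcases List.mem_append.1 hp with hp | hp
        · have hpnx : p ≠ nx := fun h => hnxE (h ▸ hp)
          show pvGet (pvSet w' nx (pvGet w' x)) p = _
          rw [pvGet_pvSet w' nx p _ s2 hr.1 hr.2, if_neg hpnx, mpush p hp,
            pvContrib_append, if_neg (fun h => hpnx h.symm)]
          ring
        · simp only [List.mem_singleton] at hp
          subst hp
          show pvGet (pvSet w' p (pvGet w' x)) p = _
          rw [pvGet_pvSet w' p p _ s2 hr.1 hr.2, if_pos rfl, hwx',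
            pvContrib_append, if_pos rfl,
            pvPush_zero w v' P p mclP hr.1 hr.2 hz,
            pvContrib_zero w x done p hnxdone]
          ring
      · intro q hq e he h0 h1
        rw [hgv e]
        split_ifs with henx
        · omega
        · exact mclP q hq e he h0 h1
      · intro e he h0 h1
        rw [hgv e]
        rcases List.mem_append.1 he with he | he
        · split_ifs with henx
          · omega
          · exact mclD e he h0 h1
        · simp only [List.mem_singleton] at he
          rw [if_pos he]
          omega
      · have : pvSC (pvSet v' nx (pvGet v' x + 1)) = pvSC v' + 1 := by
          apply pvSC_update _ _ _ s1 hr.1 hr.2 hz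
          rw [hvx']
          omega
        rw [this, m7, List.length_append]
        simp only [List.length_cons, List.length_nil]
        omega
    · by_cases he : pvGet v' nx = d + 2
      · -- already discovered this level: A accumulates, B skips
        have hnxE : nx ∈ E := (m4 nx).2 he
        have hA : pvRelaxA x (v', w', E) nx =
            (v', pvSet w' nx (pvGet w' nx + pvGet w' x), E) := by
          unfold pvRelaxA
          rw [if_pos hr, if_neg hz, if_pos (by rw [he, hvx']; ring)]
        have hB : pvP1Relax (d + 1) (dist', E) nx = (dist', E) := by
          unfold pvP1Relax
          rw [if_neg (by
            intro hc
            rw [hDnx, he] at hc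
            omega)]
        rw [hA, hB]
        refine ⟨⟨s1, by rw [pvSet_size]; exact s2, s3, mrel, ?_, m4, m5, mnd, ?_, mclP,
          ?_, m7⟩, rfl⟩
        · intro y hy
          have hynx : y ≠ nx := fun h => hy (h ▸ hnxE)
          refine ⟨(m3 y hy).1, ?_⟩
          rw [pvGet_pvSet w' nx y _ s2 hr.1 hr.2, if_neg hynx]
          exact (m3 y hy).2
        · intro p hp
          rw [pvGet_pvSet w' nx p _ s2 hr.1 hr.2]
          by_cases hpnx : p = nx
          · rw [if_pos hpnx, hpnx, mpush nx hnxE, hwx', pvContrib_append, if_pos rfl]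
            ring
          · rw [if_neg hpnx, mpush p hp, pvContrib_append, if_neg (fun h => hpnx h.symm)]
            ring
        · intro e he' h0 h1
          rcases List.mem_append.1 he' with he' | he'
          · exact mclD e he' h0 h1
          · simp only [List.mem_singleton] at he'
            subst he'
            exact hz
      · -- seen at an earlier level (or the frontier itself): both skip
        have hA : pvRelaxA x (v', w', E) nx = (v', w', E) := by
          unfold pvRelaxA
          rw [if_pos hr, if_neg hz, if_neg (show ¬ pvGet v' nx = pvGet v' x + 1 by
            rw [hvx']
            intro hq
            apply he
            omega)]
        have hB : pvP1Relax (d + 1) (dist', E) nx = (dist', E) := by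
          unfold pvP1Relax
          rw [if_neg (by
            intro hc
            rw [hDnx] at hc
            have := hc.2
            omega)]
        rw [hA, hB]
        refine ⟨⟨s1, s2, s3, mrel, m3, m4, m5, mnd, ?_, mclP, ?_, m7⟩, rfl⟩
        · intro p hp
          rw [mpush p hp, pvContrib_append]
          have hpnx : nx ≠ p := by
            intro h
            apply he
            rw [h]
            exact ((m4 p).1 hp)
          rw [if_neg hpnx]
          ring
        · intro e he' h0 h1
          rcases List.mem_append.1 he' with he' | he'
          · exact mclD e he' h0 h1
          · simp only [List.mem_singleton] at he'
            subst he'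
            exact hz
  · -- out of range: both skip
    have hA : pvRelaxA x (v', w', E) nx = (v', w', E) := by
      unfold pvRelaxA
      rw [if_neg hr]
    have hB : pvP1Relax (d + 1) (dist', E) nx = (dist', E) := by
      unfold pvP1Relax
      rw [if_neg (by intro hc; exact hr hc.1)]
    rw [hA, hB]
    refine ⟨⟨s1, s2, s3, mrel, m3, m4, m5, mnd, ?_, mclP, ?_, m7⟩, rfl⟩
    · intro p hp
      rw [mpush p hp, pvContrib_append]
      have hpnx : nx ≠ p := by
        intro h
        have := (m5 p hp).1
        have := (m5 p hp).2.1
        subst h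
        exact hr ⟨by omega, by omega⟩
      rw [if_neg hpnx]
      ring
    · intro e he' h0 h1
      rcases List.mem_append.1 he' with he' | he'
      · exact mclD e he' h0 h1
      · simp only [List.mem_singleton] at he'
        subst he'
        exact absurd ⟨h0, h1⟩ hr

-- the three neighbours of one frontier node, in lockstep
lemma pvNbrFold2 (d : Int) (v w : Array Int) (P : List Int) (x : Int)
    (hd : 0 ≤ d) (hvx : pvGet v x = d + 1) :
    ∀ (ns done : List Int) (v' w' : Array Int) (E : List Int) (dist' : Array Int),
    pvNInv d v w P x done v' w' E dist' →
    pvNInv d v w P x (done ++ ns) (List.foldl (pvRelaxA x) (v', w', E) ns).1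
      (List.foldl (pvRelaxA x) (v', w', E) ns).2.1
      (List.foldl (pvRelaxA x) (v', w', E) ns).2.2
      (List.foldl (pvP1Relax (d + 1)) (dist', E) ns).1 ∧
    (List.foldl (pvP1Relax (d + 1)) (dist', E) ns).2 =
      (List.foldl (pvRelaxA x) (v', w', E) ns).2.2 := by
  intro ns
  induction ns with
  | nil =>
      intro done v' w' E dist' hM
      simp only [List.foldl_nil, List.append_nil]
      exact ⟨hM, by trivial⟩
  | cons n ns ihn =>
      intro done v' w' E dist' hM
      obtain ⟨hM1, hEq⟩ := pvNbr2 d v w P x done n hd hvx v' w' E dist' hM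
      simp only [List.foldl_cons]
      have hBtup : ((pvP1Relax (d + 1) (dist', E) n).1, (pvRelaxA x (v', w', E) n).2.2)
          = pvP1Relax (d + 1) (dist', E) n := by
        rw [← hEq]
      have key := ihn (done ++ [n]) (pvRelaxA x (v', w', E) n).1 (pvRelaxA x (v', w', E) n).2.1
        (pvRelaxA x (v', w', E) n).2.2 (pvP1Relax (d + 1) (dist', E) n).1 hM1
      rw [hBtup] at key
      constructor
      · have : done ++ n :: ns = (done ++ [n]) ++ ns := by simp
        rw [this]
        exact key.1
      · exact key.2

-- one whole level: A's fold over L2 against B's phase-1 fold over the same frontier suffix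
lemma pvLevelAux2 (d : Int) (v w : Array Int) (hd : 0 ≤ d) :
    ∀ (L2 P : List Int) (v' w' : Array Int) (E : List Int) (dist' : Array Int),
    pvMInv2 d v w P v' w' E dist' →
    (∀ x ∈ L2, pvGet v x = d + 1) →
    pvMInv2 d v w (P ++ L2) (List.foldl pvLvlStep (v', w', E) L2).1
      (List.foldl pvLvlStep (v', w', E) L2).2.1 (List.foldl pvLvlStep (v', w', E) L2).2.2
      (List.foldl (pvP1Node (d + 1)) (dist', E) L2).1 ∧
    (List.foldl (pvP1Node (d + 1)) (dist', E) L2).2 =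
      (List.foldl pvLvlStep (v', w', E) L2).2.2 := by
  intro L2
  induction L2 with
  | nil =>
      intro P v' w' E dist' hM hL
      simp only [List.foldl_nil, List.append_nil]
      exact ⟨hM, by trivial⟩
  | cons x L2 ih =>
      intro P v' w' E dist' hM hL
      have hx := hL x (by simp)
      obtain ⟨s1, s2, s3, mrel, m3, m4, m5, mnd, mpush, mclP, m7⟩ := hM
      have hN0 : pvNInv d v w P x [] v' w' E dist' := by
        refine ⟨s1, s2, s3, mrel, m3, m4, m5, mnd, ?_, mclP, by simp, m7⟩
        intro p hp
        rw [mpush p hp, pvContrib_nil]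
        ring
      obtain ⟨hN1, hEq⟩ := pvNbrFold2 d v w P x hd hx [x - 1, x + 1, x * 2] [] v' w' E dist' hN0
      simp only [List.nil_append] at hN1
      -- one node done: convert to pvMInv2 over P ++ [x]
      obtain ⟨t1, t2, t3, trel, t3', t4, t5, tnd, tpush, tclP, tclD, t7⟩ := hN1
      have hM1 : pvMInv2 d v w (P ++ [x]) (List.foldl (pvRelaxA x) (v', w', E) [x - 1, x + 1, x * 2]).1
          (List.foldl (pvRelaxA x) (v', w', E) [x - 1, x + 1, x * 2]).2.1
          (List.foldl (pvRelaxA x) (v', w', E) [x - 1, x + 1, x * 2]).2.2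
          (List.foldl (pvP1Relax (d + 1)) (dist', E) [x - 1, x + 1, x * 2]).1 := by
        refine ⟨t1, t2, t3, trel, t3', t4, t5, tnd, ?_, ?_, t7⟩
        · intro p hp
          rw [tpush p hp, pvPush_append]
        · intro q hq
          rcases List.mem_append.1 hq with hq | hq
          · exact tclP q hq
          · simp only [List.mem_singleton] at hq
            subst hq
            exact tclD
      simp only [List.foldl_cons]
      have hAstep : pvLvlStep (v', w', E) x
          = List.foldl (pvRelaxA x) (v', w', E) [x - 1, x + 1, x * 2] := rfl
      have hBstep : pvP1Node (d + 1) (dist', E) x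
          = List.foldl (pvP1Relax (d + 1)) (dist', E) [x - 1, x + 1, x * 2] := by
        show List.foldl (pvP1Relax (d + 1)) (dist', E) [x - 1, x + 1, 2 * x] = _
        rw [show (2 * x) = x * 2 by ring]
      have hBtup : ((List.foldl (pvP1Relax (d + 1)) (dist', E) [x - 1, x + 1, x * 2]).1,
          (List.foldl (pvRelaxA x) (v', w', E) [x - 1, x + 1, x * 2]).2.2)
          = List.foldl (pvP1Relax (d + 1)) (dist', E) [x - 1, x + 1, x * 2] := by
        rw [← hEq]
      have key := ih (P ++ [x]) (List.foldl (pvRelaxA x) (v', w', E) [x - 1, x + 1, x * 2]).1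
        (List.foldl (pvRelaxA x) (v', w', E) [x - 1, x + 1, x * 2]).2.1
        (List.foldl (pvRelaxA x) (v', w', E) [x - 1, x + 1, x * 2]).2.2
        (List.foldl (pvP1Relax (d + 1)) (dist', E) [x - 1, x + 1, x * 2]).1
        hM1 (fun z hz => hL z (by simp [hz]))
      rw [hBtup] at key
      rw [hAstep, hBstep]
      have hPx : P ++ x :: L2 = (P ++ [x]) ++ L2 := by simp
      rw [hPx]
      exact key

-- global invariant at the start of a level (A about to pop level L, B's phase 1 about to
-- expand frontier L = levels.getLastD [])
def pvInv (N K d : Int) (v w : Array Int) (L : List Int) (dist : Array Int) : Prop :=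
  0 ≤ N ∧ N < K ∧ K ≤ 100000 ∧ 0 ≤ d ∧
  v.size = 100001 ∧ w.size = 100001 ∧ dist.size = 100001 ∧
  (∀ y, 0 ≤ y → y ≤ 100000 → pvGet v y = pvGet dist y + 1) ∧
  (∀ y, pvGet v y = d + 1 ↔ y ∈ L) ∧
  (∀ y, pvGet v y ≠ 0 → 1 ≤ pvGet v y ∧ pvGet v y ≤ d + 1) ∧
  (∀ y ∈ L, 0 ≤ y ∧ y ≤ 100000) ∧
  L.Nodup ∧
  (∀ p, N ≤ p → p ≤ N + d → p ≤ 100000 → pvGet v p ≠ 0) ∧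
  (∀ y, pvGet v y ≠ 0 → y ∉ L → ∀ nx ∈ ([y - 1, y + 1, y * 2] : List Int),
    0 ≤ nx → nx ≤ 100000 → pvGet v nx ≠ 0)

-- the per-level correspondence packaged at the pvInv level
lemma pvLevel2 (N K d : Int) (v w : Array Int) (L : List Int) (dist : Array Int)
    (hInv : pvInv N K d v w L dist) :
    pvInv N K (d + 1) (List.foldl pvLvlStep (v, w, []) L).1
      (List.foldl pvLvlStep (v, w, []) L).2.1 (List.foldl pvLvlStep (v, w, []) L).2.2
      (List.foldl (pvP1Node (d + 1)) (dist, []) L).1 ∧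
    (List.foldl (pvP1Node (d + 1)) (dist, []) L).2 = (List.foldl pvLvlStep (v, w, []) L).2.2 ∧
    pvSC (List.foldl pvLvlStep (v, w, []) L).1 =
      pvSC v + (List.foldl pvLvlStep (v, w, []) L).2.2.length ∧
    (∀ y, pvGet (List.foldl pvLvlStep (v, w, []) L).1 y ≠ 0 →
      pvGet v y ≠ 0 ∨ y ∈ (List.foldl pvLvlStep (v, w, []) L).2.2) ∧
    (∀ p ∈ (List.foldl pvLvlStep (v, w, []) L).2.2,
      pvGet (List.foldl pvLvlStep (v, w, []) L).2.1 p = pvPush w L p) ∧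
    (List.foldl pvLvlStep (v, w, []) L).2.2.Nodup ∧
    (∀ y, y ∉ (List.foldl pvLvlStep (v, w, []) L).2.2 →
      pvGet (List.foldl pvLvlStep (v, w, []) L).1 y = pvGet v y ∧
      pvGet (List.foldl pvLvlStep (v, w, []) L).2.1 y = pvGet w y) ∧
    (∀ y ∈ (List.foldl pvLvlStep (v, w, []) L).2.2, pvGet v y = 0) := by
  obtain ⟨i0a, i0b, i0c, i0d, s1, s2, s3, irel, i7, i9, i10, ind, i11, i12⟩ := hInv
  have hM0 : pvMInv2 d v w [] v w [] dist := by
    refine ⟨s1, s2, s3, irel, fun y _ => ⟨rfl, rfl⟩, fun y => ?_,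
      fun y hy => absurd hy (List.not_mem_nil), List.nodup_nil, fun p hp => absurd hp (List.not_mem_nil),
      fun q hq => absurd hq (List.not_mem_nil), by simp⟩
    simp only [List.not_mem_nil, false_iff]
    intro h
    have := (i9 y (by rw [h]; omega)).2
    omega
  obtain ⟨hMf, hEq⟩ := pvLevelAux2 d v w i0d L [] v w [] dist hM0 (fun x hx => (i7 x).2 hx)
  simp only [List.nil_append] at hMf
  obtain ⟨f1, f2, f3, frel, m3, m4, m5, mnd, mpush, mcl, m7⟩ := hMf
  set st := List.foldl pvLvlStep (v, w, ([] : List Int)) L with hst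
  have hkeepnz : ∀ y, pvGet v y ≠ 0 → pvGet st.1 y ≠ 0 := by
    intro y hy
    by_cases hE : y ∈ st.2.2
    · rw [(m4 y).1 hE]
      omega
    · rw [(m3 y hE).1]
      exact hy
  have hstab : ∀ y, pvGet st.1 y ≠ 0 → pvGet v y ≠ 0 ∨ y ∈ st.2.2 := by
    intro y hy
    by_cases hE : y ∈ st.2.2
    · exact Or.inr hE
    · exact Or.inl (by rw [← (m3 y hE).1]; exact hy)
  refine ⟨⟨i0a, i0b, i0c, by omega, f1, f2, f3, frel, ?_, ?_,
    fun y hy => ⟨(m5 y hy).1, (m5 y hy).2.1⟩, mnd, ?_, ?_⟩, hEq, m7, hstab, mpush, mnd,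
    m3, fun y hy => (m5 y hy).2.2⟩
  · intro y
    rw [show d + 1 + 1 = d + 2 by ring]
    exact ((m4 y).symm)
  · intro y hy
    by_cases hE : y ∈ st.2.2
    · rw [(m4 y).1 hE]
      constructor <;> omega
    · rw [(m3 y hE).1] at hy ⊢
      have := i9 y hy
      constructor <;> omega
  · intro p hp1 hp2 hp3
    by_cases hclose : p ≤ N + d
    · exact hkeepnz p (i11 p hp1 hclose hp3)
    · have hq : pvGet v (p - 1) ≠ 0 := i11 (p - 1) (by omega) (by omega) (by omega)
      by_cases hqL : p - 1 ∈ L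
      · have := mcl (p - 1) hqL p (by simp) (by omega) hp3
        exact this
      · exact hkeepnz p (i12 (p - 1) hq hqL p (by simp) (by omega) hp3)
  · intro y hy hyE nx hnx h0 h1
    have hyv : pvGet v y ≠ 0 := by
      rcases hstab y hy with h | h
      · exact h
      · exact absurd h hyE
    by_cases hyL : y ∈ L
    · exact mcl y hyL nx hnx h0 h1
    · exact hkeepnz nx (i12 y hyv hyL nx hnx h0 h1)

-- if the frontier is empty, the visited set is closed under moves, so K would already be visited
lemma pvClimb (N K d : Int) (v w : Array Int) (dist : Array Int)
    (hInv : pvInv N K d v w [] dist) : pvGet v K ≠ 0 := by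
  obtain ⟨i0a, i0b, i0c, i0d, s1, s2, s3, irel, i7, i9, i10, ind, i11, i12⟩ := hInv
  have step : ∀ t : Nat, N + t ≤ 100000 → pvGet v (N + t) ≠ 0 := by
    intro t
    induction t with
    | zero =>
        intro ht
        have := i11 N le_rfl (by omega) (by omega)
        simpa using this
    | succ t iht =>
        intro ht
        have h1 : pvGet v (N + t) ≠ 0 := iht (by push_cast at ht ⊢; omega)
        have := i12 (N + t) h1 (List.not_mem_nil) (N + t + 1) (by simp) (by omega)
          (by push_cast at ht ⊢; omega)
        have he : N + ((t + 1 : Nat) : Int) = N + (t : Int) + 1 := by push_cast; ring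
        rw [he]
        exact this
  have hKt : K = N + ((K - N).toNat : Int) := by omega
  rw [hKt]
  exact step (K - N).toNat (by omega)

-- ===== B-side phase-2 evaluation =====

lemma pvP2Lvl_size : ∀ (E : List Int) (rdist wB : Array Int),
    (pvP2Lvl rdist wB E).size = wB.size := by
  intro E
  induction E with
  | nil => intro rdist wB; rfl
  | cons p E ih =>
      intro rdist wB
      show (pvP2Lvl rdist (pvSet wB p (pvPull rdist wB p)) E).size = _
      rw [ih, pvSet_size]

-- evaluating the pull at one new-level cell against the push over the previous frontier
lemma pvPull_eval (rdist wB w : Array Int) (L : List Int) (d p : Int)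
    (hp0 : 0 ≤ p) (hp1 : p ≤ 100000) (hdp : pvGet rdist p = d + 1)
    (hchar : ∀ q, 0 ≤ q → q ≤ 100000 → (pvGet rdist q = d ↔ q ∈ L))
    (hLrange : ∀ q ∈ L, 0 ≤ q ∧ q ≤ 100000)
    (hwL : ∀ q ∈ L, pvGet wB q = pvGet w q)
    (hnd : L.Nodup) :
    pvPull rdist wB p = pvPush w L p := by
  rw [pvPush_eval w L p hnd]
  have hmod : PySem.Int.mod p 2 = p % 2 := PySem.Int.mod_eq_emod_of_pos (by norm_num)
  have hdiv : PySem.Int.floordiv p 2 = p / 2 := PySem.Int.floordiv_eq_ediv_of_pos (by norm_num)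
  have hg1 : (p + 1 ≤ 100000 ∧ pvGet rdist (p + 1) = pvGet rdist p - 1) ↔ p + 1 ∈ L := by
    rw [hdp]
    constructor
    · intro h
      exact (hchar (p + 1) (by omega) h.1).1 (by rw [h.2]; ring)
    · intro h
      have hr := hLrange (p + 1) h
      exact ⟨hr.2, by rw [(hchar (p + 1) hr.1 hr.2).2 h]; ring⟩
  have hg2 : (0 ≤ p - 1 ∧ pvGet rdist (p - 1) = pvGet rdist p - 1) ↔ p - 1 ∈ L := by
    rw [hdp]
    constructor
    · intro h
      exact (hchar (p - 1) h.1 (by omega)).1 (by rw [h.2]; ring)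
    · intro h
      have hr := hLrange (p - 1) h
      exact ⟨hr.1, by rw [(hchar (p - 1) hr.1 hr.2).2 h]; ring⟩
  have hg3' : (p % 2 = 0 ∧ pvGet rdist (p / 2) = pvGet rdist p - 1) ↔ (p % 2 = 0 ∧ p / 2 ∈ L) := by
    constructor
    · intro h
      exact ⟨h.1, (hchar (p / 2) (by omega) (by omega)).1 (by rw [h.2, hdp]; ring)⟩
    · intro h
      exact ⟨h.1, by rw [(hchar (p / 2) (by omega) (by omega)).2 h.2, hdp]; ring⟩
  unfold pvPull
  simp only [hmod, hdiv]
  simp only [hg1, hg2, hg3']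
  split_ifs
  all_goals try rw [hwL _ ‹p + 1 ∈ L›]
  all_goals try rw [hwL _ ‹p - 1 ∈ L›]
  all_goals try rw [hwL _ (‹p % 2 = 0 ∧ p / 2 ∈ L›).2]
  all_goals ring

-- phase-2 fold over one recorded level, evaluated pointwise
lemma pvP2Lvl_eval (rdist w : Array Int) (L : List Int) (d : Int)
    (hchar : ∀ q, 0 ≤ q → q ≤ 100000 → (pvGet rdist q = d ↔ q ∈ L))
    (hLrange : ∀ q ∈ L, 0 ≤ q ∧ q ≤ 100000)
    (hndL : L.Nodup) :
    ∀ (E : List Int) (wB : Array Int), wB.size = 100001 →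
    (∀ p ∈ E, 0 ≤ p ∧ p ≤ 100000 ∧ pvGet rdist p = d + 1) → E.Nodup →
    (∀ q ∈ L, pvGet wB q = pvGet w q) →
    ∀ y, pvGet (pvP2Lvl rdist wB E) y = if y ∈ E then pvPush w L y else pvGet wB y := by
  intro E
  induction E with
  | nil => intro wB _ _ _ _ y; simp [pvP2Lvl]
  | cons p E ih =>
      intro wB hsz hE hnd hwL y
      have hp := hE p (by simp)
      have hstep : pvP2Lvl rdist wB (p :: E)
          = pvP2Lvl rdist (pvSet wB p (pvPull rdist wB p)) E := rfl
      have hval : pvPull rdist wB p = pvPush w L p :=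
        pvPull_eval rdist wB w L d p hp.1 hp.2.1 hp.2.2 hchar hLrange hwL hndL
      have hLp : ∀ q ∈ L, q ≠ p := by
        intro q hq hqp
        have := (hchar q (hLrange q hq).1 (hLrange q hq).2).2 hq
        rw [hqp, hp.2.2] at this
        omega
      have hwL' : ∀ q ∈ L, pvGet (pvSet wB p (pvPull rdist wB p)) q = pvGet w q := by
        intro q hq
        rw [pvGet_pvSet wB p q _ hsz hp.1 hp.2.1, if_neg (hLp q hq), hwL q hq]
      have ihy := ih (pvSet wB p (pvPull rdist wB p)) (by rw [pvSet_size]; exact hsz)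
        (fun p' hp' => hE p' (by simp [hp'])) hnd.of_cons hwL' y
      rw [hstep, ihy]
      have hpE : p ∉ E := (List.nodup_cons.mp hnd).1
      by_cases hyE : y ∈ E
      · rw [if_pos hyE, if_pos (by simp [hyE])]
      · rw [if_neg hyE, pvGet_pvSet wB p y _ hsz hp.1 hp.2.1]
        by_cases hyp : y = p
        · rw [if_pos hyp, if_pos (by simp [hyp]), hyp, hval]
        · rw [if_neg hyp, if_neg (by simp [hyp, hyE])]

-- main simulation: B's remaining phase-1 run plus the pending phase-2 fold return exactly
-- what A's final arrays yield at K
lemma pvMain (N K : Int) : ∀ (fuelB : Nat) (d : Int) (v w : Array Int) (L : List Int)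
    (dist : Array Int) (levels : List (List Int)) (fuelA : Nat),
    pvInv N K d v w L dist →
    levels.getLastD [] = L →
    (levels.length : Int) = d + 1 →
    (pvGet v K = 0 ∨ K ∈ L) →
    (pvGet v K = 0 → K - N + 1 ≤ d + (fuelB : Int)) →
    1 ≤ fuelB →
    2 * (100001 - pvSC v) + L.length ≤ fuelA →
    ∀ (wB : Array Int), wB.size = 100001 → (∀ y, pvGet wB y = pvGet w y) →
    pvGet (pvP1Run fuelB dist levels K).1 K = pvGet (pvRunA fuelA v w L).1 K - 1 ∧
    pvGet (List.foldl (pvP2Lvl (pvP1Run fuelB dist levels K).1) wB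
        ((pvP1Run fuelB dist levels K).2.drop levels.length)) K
      = pvGet (pvRunA fuelA v w L).2 K := by
  intro fuelB
  induction fuelB with
  | zero => intro _ _ _ _ _ _ _ _ _ _ _ _ h1 _; omega
  | succ f ih =>
      intro d v w L dist levels fuelA hInv hlast hlen hK hfB h1 hfA wB hwsz hwB
      obtain ⟨i0a, i0b, i0c, i0d, s1, s2, s3, irel, i7, i9, i10, ind, i11, i12⟩ := hInv
      have hKrange : 0 ≤ K ∧ K ≤ 100000 := ⟨by omega, i0c⟩
      have hDK : pvGet dist K = pvGet v K - 1 := by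
        have := irel K hKrange.1 hKrange.2
        omega
      by_cases hfind : pvGet dist K = -1
      · -- K not yet reached: advance one level on both sides
        have hvK : pvGet v K = 0 := by omega
        have hKL : K ∉ L := fun h => by
          have := (i7 K).2 h
          omega
        have hdlt : d ≤ K - N - 1 := by
          by_contra h
          exact i11 K (by omega) (by omega) (by omega) hvK
        cases hLe : L with
        | nil =>
            subst hLe
            exact absurd hvK (pvClimb N K d v w dist
              ⟨i0a, i0b, i0c, i0d, s1, s2, s3, irel, i7, i9, i10, ind, i11, i12⟩)
        | cons x L0 =>
            subst hLe
            have hInvL : pvInv N K d v w (x :: L0) dist :=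
              ⟨i0a, i0b, i0c, i0d, s1, s2, s3, irel, i7, i9, i10, ind, i11, i12⟩
            obtain ⟨hInv', hEq, hSC, hstab2, hpushE, hndE, hout, hfresh⟩ :=
              pvLevel2 N K d v w (x :: L0) dist hInvL
            set stA := List.foldl pvLvlStep (v, w, ([] : List Int)) (x :: L0) with hstA
            set E := stA.2.2 with hE
            -- A advances by the whole chunk
            have hlenA : (x :: L0).length ≤ fuelA := by omega
            have hA := pvRunA_chunk (x :: L0) fuelA v w [] hlenA
            rw [List.append_nil] at hA
            -- B's loop takes one iteration
            have hBstep : pvP1Run (f + 1) dist levels K =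
                pvP1Run f (List.foldl (pvP1Node (levels.length : Int)) (dist, []) (levels.getLastD [])).1
                  (levels ++ [(List.foldl (pvP1Node (levels.length : Int)) (dist, []) (levels.getLastD [])).2]) K := by
              simp only [pvP1Run, if_pos hfind]
            have hlvl : (levels.length : Int) = d + 1 := hlen
            have hlfold : List.foldl (pvP1Node (levels.length : Int)) (dist, []) (levels.getLastD [])
                = List.foldl (pvP1Node (d + 1)) (dist, []) (x :: L0) := by
              rw [hlast, hlvl]
            set stB := List.foldl (pvP1Node (d + 1)) (dist, ([] : List Int)) (x :: L0) with hstB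
            have hstB2 : stB.2 = E := hEq
            have hBrun : pvP1Run (f + 1) dist levels K = pvP1Run f stB.1 (levels ++ [E]) K := by
              rw [hBstep, hlfold, ← hstB2]
            -- invariant after the level
            have hSCle := pvSC_le stA.1
            have hK' : pvGet stA.1 K = 0 ∨ K ∈ E := by
              by_cases hz : pvGet stA.1 K = 0
              · exact Or.inl hz
              · rcases hstab2 K hz with h | h
                · exact absurd hvK h
                · exact Or.inr h
            obtain ⟨j0a, j0b, j0c, j0d, t1, t2, t3, jrel, j7, j9, j10, jnd, j11, j12⟩ := id hInv'
            -- the recursive call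
            have ihr := ih (d + 1) stA.1 stA.2.1 E stB.1 (levels ++ [E])
              (fuelA - (x :: L0).length) hInv'
              (by simp)
              (by
                simp only [List.length_append, List.length_cons, List.length_nil]
                push_cast
                omega)
              hK'
              (by
                intro _
                have := hfB hvK
                push_cast at this ⊢
                omega)
              (by omega)
              (by omega)
            -- facts about the final dist array
            have hrd := fun y => pvP1Run_dist f stB.1 (levels ++ [E]) K y t3
            set r := pvP1Run f stB.1 (levels ++ [E]) K with hr
            have hrsz : r.1.size = 100001 := (hrd 0).1
            have hlen' : ((levels ++ [E]).length : Int) = d + 2 := by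
              simp only [List.length_append, List.length_cons, List.length_nil]
              push_cast
              omega
            -- characterize r.1 at value d (the old frontier) and at E (value d+1)
            have hstabB : ∀ y, pvGet stB.1 y ≠ -1 → pvGet r.1 y = pvGet stB.1 y := by
              intro y hy
              rcases (hrd y).2 with h | h
              · exact h
              · exact absurd h.1 hy
            have hcharE : ∀ p ∈ E, 0 ≤ p ∧ p ≤ 100000 ∧ pvGet r.1 p = d + 1 := by
              intro p hp
              have hpr0 : 0 ≤ p := (j10 p hp).1
              have hpr1 : p ≤ 100000 := (j10 p hp).2
              have hvp : pvGet stA.1 p = d + 2 := by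
                have := (j7 p).2 hp
                omega
              have hdp : pvGet stB.1 p = d + 1 := by
                have := jrel p hpr0 hpr1
                omega
              exact ⟨hpr0, hpr1, by rw [hstabB p (by omega), hdp]⟩
            have hcharL : ∀ q, 0 ≤ q → q ≤ 100000 → (pvGet r.1 q = d ↔ q ∈ (x :: L0)) := by
              intro q hq0 hq1
              constructor
              · intro hq
                by_cases hset : pvGet stB.1 q = -1
                · rcases (hrd q).2 with h | h
                  · rw [h] at hq
                    omega
                  · have := h.2
                    rw [hlen'] at this
                    omega
                · have := hstabB q hset
                  rw [this] at hq
                  have hvq : pvGet stA.1 q = d + 1 := by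
                    have := jrel q hq0 hq1
                    omega
                  by_cases hqE : q ∈ E
                  · have := (j7 q).2 hqE
                    omega
                  · have := (hout q hqE).1
                    rw [this] at hvq
                    exact (i7 q).1 hvq
              · intro hq
                have hvq : pvGet v q = d + 1 := (i7 q).2 hq
                have hqE : q ∉ E := by
                  intro hc
                  have := hfresh q hc
                  omega
                have hvq' : pvGet stA.1 q = d + 1 := by
                  rw [(hout q hqE).1]
                  exact hvq
                have hdq : pvGet stB.1 q = d := by
                  have := jrel q hq0 hq1
                  omega
                rw [hstabB q (by omega), hdq]
            -- phase-2 evaluation of level E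
            have hwB' : ∀ y, pvGet (pvP2Lvl r.1 wB E) y = pvGet stA.2.1 y := by
              intro y
              rw [pvP2Lvl_eval r.1 w (x :: L0) d hcharL i10 ind E wB hwsz hcharE hndE
                (fun q hq => hwB q)]
              by_cases hyE : y ∈ E
              · rw [if_pos hyE, hpushE y hyE]
              · rw [if_neg hyE, hwB y, (hout y hyE).2]
            -- assemble: the dropped-levels list starts with E
            obtain ⟨fut, hfut⟩ := pvP1Run_prefix f stB.1 (levels ++ [E]) K
            have hdrop : r.2.drop levels.length = E :: (r.2.drop (levels ++ [E]).length) := by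
              rw [hfut, List.append_assoc]
              rw [List.drop_left]
              simp
            have ihr' := ihr (pvP2Lvl r.1 wB E) (by rw [pvP2Lvl_size]; exact hwsz) hwB'
            constructor
            · rw [hBrun, hA]
              exact ihr'.1
            · rw [hBrun, hA, hdrop]
              simp only [List.foldl_cons]
              exact ihr'.2
      · -- K is in the current frontier: B's loop stops; A's cells at K are already final
        have hvK1 : pvGet v K ≠ 0 := by omega
        have hKL : K ∈ L := by
          rcases hK with h | h
          · exact absurd h hvK1
          · exact h
        have hvK : pvGet v K = d + 1 := (i7 K).2 hKL
        have hstab := pvRunA_stable fuelA v w L K s1 s2 (by omega)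
          (fun x hx => by rw [hvK, (i7 x).2 hx])
        have hBstop : pvP1Run (f + 1) dist levels K = (dist, levels) := by
          simp only [pvP1Run, if_neg hfind]
        rw [hBstop]
        constructor
        · simp only
          rw [hstab.1, hDK]
        · simp only [List.drop_length, List.foldl_nil]
          rw [hstab.2, hwB K]

-- ===== VERDICT (by name: the statement is the Claim_ definition above) =====
theorem find_fastest_path_spec : Claim_equal_find_fastest_path := by
  intro N K hDom hPre
  unfold Spec_find_fastest_path
  by_cases hNK : N ≥ K
  · unfold find_fastest_path find_fastest_path_alt
    rw [if_pos hNK, if_pos hNK]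
  · have hPre' : 0 ≤ N ∧ K ≤ 100000 := by
      rcases hPre with h | h
      · omega
      · exact h
    have hNK' : N < K := by omega
    have hszr : (Array.replicate 100001 (0:Int)).size = 100001 := Array.size_replicate
    have hszr' : (Array.replicate 100001 (-1:Int)).size = 100001 := Array.size_replicate
    have hv0 : ∀ y, pvGet (pvSet (Array.replicate 100001 0) N 1) y =
        if y = N then 1 else 0 := by
      intro y
      rw [pvGet_pvSet _ N y 1 hszr (by omega) (by omega), pvGet_replicate]
      split_ifs <;> rfl
    have hD0 : ∀ y, 0 ≤ y → y ≤ 100000 → pvGet (pvSet (Array.replicate 100001 (-1)) N 0) y =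
        if y = N then 0 else -1 := by
      intro y hy0 hy1
      rw [pvGet_pvSet _ N y 0 hszr' (by omega) (by omega), pvGet_replicate]
      split_ifs with h1 h2
      · rfl
      · rfl
      · omega
    have hInv : pvInv N K 0 (pvSet (Array.replicate 100001 0) N 1)
        (pvSet (Array.replicate 100001 0) N 1) [N]
        (pvSet (Array.replicate 100001 (-1)) N 0) := by
      refine ⟨hPre'.1, hNK', hPre'.2, le_refl 0,
        by rw [pvSet_size]; exact hszr, by rw [pvSet_size]; exact hszr,
        by rw [pvSet_size]; exact hszr',
        ?_, ?_, ?_, ?_, List.nodup_singleton N, ?_, ?_⟩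
      · intro y hy0 hy1
        rw [hv0 y, hD0 y hy0 hy1]
        split_ifs <;> ring
      · intro y
        rw [hv0 y]
        constructor
        · intro h
          split_ifs at h with hyN
          · simp [hyN]
          · omega
        · intro hm
          simp only [List.mem_singleton] at hm
          rw [if_pos hm]
          norm_num
      · intro y hy
        rw [hv0 y] at hy ⊢
        split_ifs at hy ⊢ <;> omega
      · intro y hy
        simp only [List.mem_singleton] at hy
        subst hy
        omega
      · intro p hp1 hp2 _
        have hpN : p = N := by omega
        rw [hpN, hv0 N, if_pos rfl]
        omega
      · intro y hy hyL nx _ _ _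
        rw [hv0 y] at hy
        split_ifs at hy with hyN
        · exact absurd (by simp [hyN]) hyL
        · omega
    have hK0 : pvGet (pvSet (Array.replicate 100001 0) N 1) K = 0 := by
      rw [hv0 K, if_neg (by omega)]
    have hmain := pvMain N K 100002 0 (pvSet (Array.replicate 100001 0) N 1)
      (pvSet (Array.replicate 100001 0) N 1) [N]
      (pvSet (Array.replicate 100001 (-1)) N 0) [[N]]
      300004 hInv (by simp) (by simp)
      (Or.inl hK0)
      (by intro _; push_cast; omega) (by omega)
      (by
        simp only [List.length_singleton]
        omega)
      (pvSet (Array.replicate 100001 0) N 1)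
      (by rw [pvSet_size]; exact hszr)
      (fun y => rfl)
    unfold find_fastest_path find_fastest_path_alt
    rw [if_neg hNK, if_neg hNK]
    simp only
    have h1 := hmain.1
    have h2 := hmain.2
    simp only [List.length_singleton] at h2
    rw [Prod.mk.injEq]
    constructor
    · omega
    · exact h2.symm
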